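-- pv_equiv track=rewrite | github.com/Rainhoole/ava_test | scripts/notion_scores_backfill.py | extract_scoring_section
-- ===== SOURCE A (Python) =====
-- from typing import Dict, Iterable, Iterator, List, Optional, Tuple
--
-- def extract_scoring_section(report_text: str) -> Optional[str]:
--     lines = report_text.splitlines()
--     start_idx: Optional[int] = None
--
--     for idx, line in enumerate(lines):
--         if "scoring assessment" in line.lower():
--             start_idx = idx
--             break
--
--     if start_idx is None:
--         return None
--
--     collected: List[str] = []
--     for line in lines[start_idx:]:
--         stripped = line.strip()
--         lower = stripped.lower()
--         if collected and (
--             (stripped.startswith("#") and "scoring" not in lower)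
--             or stripped.startswith("=== SECTION")
--         ):
--             break
--         collected.append(line)
--
--     return "\n".join(collected).strip() if collected else None
-- ===== SOURCE B (Python) =====
-- def extract_scoring_section(report_text):
--     lines = report_text.splitlines()
--
--     def is_break(line):
--         s = line.strip()
--         return (s.startswith("#") and "scoring" not in s.lower()) \
--             or s.startswith("=== SECTION")
--
--     starts = [i for i, l in enumerate(lines)
--               if "scoring assessment" in l.lower()]
--     if not starts:
--         return None
--     start = starts[0]
--     stops = [j for j, l in enumerate(lines) if start < j and is_break(l)]
--     stop = stops[0] if stops else len(lines)
--     return "\n".join(lines[start:stop]).strip()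
-- ===== Notes on version B (the rewrite author's own statement) =====
-- stated objective: alternative
-- what changed: Replaced A's imperative search loop and accumulating collect loop (with a guarded break and an empty-collected check) by a declarative computation: two enumerate comprehensions yield the header index and the first stop index after it, and the answer is one slice-join-strip; no accumulator or break is needed and the header line makes the slice provably non-empty.
import Mathlib
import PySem

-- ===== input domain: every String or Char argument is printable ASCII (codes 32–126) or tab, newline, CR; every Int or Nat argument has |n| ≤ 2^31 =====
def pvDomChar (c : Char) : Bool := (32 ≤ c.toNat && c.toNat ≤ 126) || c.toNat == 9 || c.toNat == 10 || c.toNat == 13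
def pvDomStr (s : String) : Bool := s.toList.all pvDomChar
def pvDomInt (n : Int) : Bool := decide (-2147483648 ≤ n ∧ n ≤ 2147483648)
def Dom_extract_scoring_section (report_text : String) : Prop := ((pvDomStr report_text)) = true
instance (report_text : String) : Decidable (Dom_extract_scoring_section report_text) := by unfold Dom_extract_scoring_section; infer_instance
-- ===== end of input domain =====

-- B replaces A's search loop + accumulating collect loop (break, empty check) by a
-- declarative computation of the header and stop indices plus one slice; equal return values proved.

-- ===== PORT A =====
-- A's first loop: 'for idx, line in enumerate(lines): if "scoring assessment" in line.lower(): start_idx = idx; break'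
def pvFindStartA (idx : Nat) : List String → Option Nat
  | [] => none
  | line :: rest =>
    if PySem.Str.isIn "scoring assessment" (PySem.Str.lower line) then some idx
    else pvFindStartA (idx + 1) rest

-- A's second loop over lines[start_idx:] with the 'collected and (…)' break test
def pvCollectA (collected : List String) : List String → List String
  | [] => collected
  | line :: rest =>
    let stripped := PySem.Str.strip line
    let lower := PySem.Str.lower stripped
    if !collected.isEmpty &&
        ((PySem.Str.startswith stripped "#" && !PySem.Str.isIn "scoring" lower)
          || PySem.Str.startswith stripped "=== SECTION") then
      collected
    else
      pvCollectA (collected ++ [line]) rest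

def extract_scoring_section (report_text : String) : Option String :=
  let lines := PySem.Str.splitlines report_text
  match pvFindStartA 0 lines with
  | none => none
  | some start_idx =>
    let collected := pvCollectA [] (PySem.List.slice lines (some (start_idx : Int)) none)
    if collected.isEmpty then none
    else some (PySem.Str.strip (PySem.Str.join "\n" collected))

-- ===== PORT B =====
-- B's 'is_break' helper
def pvIsBreakB (line : String) : Bool :=
  let s := PySem.Str.strip line
  (PySem.Str.startswith s "#" && !PySem.Str.isIn "scoring" (PySem.Str.lower s))
    || PySem.Str.startswith s "=== SECTION"

def extract_scoring_section_alt (report_text : String) : Option String :=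
  let lines := PySem.Str.splitlines report_text
  -- starts = [i for i, l in enumerate(lines) if "scoring assessment" in l.lower()]
  let starts := (PySem.List.enumerate lines).filterMap
      (fun p => if PySem.Str.isIn "scoring assessment" (PySem.Str.lower p.2) then some p.1 else none)
  match starts with
  | [] => none
  | start :: _ =>
    -- stops = [j for j, l in enumerate(lines) if start < j and is_break(l)]
    let stops := (PySem.List.enumerate lines).filterMap
        (fun p => if start < p.1 && pvIsBreakB p.2 then some p.1 else none)
    let stop := stops.headD (lines.length : Int)
    some (PySem.Str.strip (PySem.Str.join "\n" (PySem.List.slice lines (some start) (some stop))))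

-- ===== PRECONDITION & SPEC =====
def Spec_extract_scoring_section (report_text : String) (out : Option String) : Prop := out = extract_scoring_section_alt report_text
instance (report_text : String) (out : Option String) : Decidable (Spec_extract_scoring_section report_text out) := by unfold Spec_extract_scoring_section; infer_instance

-- ===== CLAIM (what is proved, stated in full; the proofs are below) =====
def Claim_equal_extract_scoring_section : Prop := ∀ (report_text : String), Dom_extract_scoring_section report_text → Spec_extract_scoring_section report_text (extract_scoring_section report_text)

-- ===== LEMMAS AND PROOFS =====

-- common reference: the section as a list of lines (header line :: lines up to the first break)
def pvRef : List String → Option (List String)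
  | [] => none
  | l :: rest =>
    if PySem.Str.isIn "scoring assessment" (PySem.Str.lower l) then
      some (l :: rest.takeWhile (fun x => !pvIsBreakB x))
    else pvRef rest

lemma pvRef_ne_nil (lines : List String) (cs : List String) (h : pvRef lines = some cs) : cs ≠ [] := by
  induction lines with
  | nil => simp [pvRef] at h
  | cons l rest ih =>
    simp only [pvRef] at h
    split at h
    · cases h; simp
    · exact ih h

-- A side vs reference ---------------------------------------------------------

lemma collectA_eq_append_takeWhile (rest : List String) :
    ∀ c : List String, c ≠ [] → pvCollectA c rest = c ++ rest.takeWhile (fun x => !pvIsBreakB x) := by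
  induction rest with
  | nil => intro c _; simp [pvCollectA]
  | cons line rest ih =>
    intro c hc
    have hne : c.isEmpty = false := by cases c with | nil => exact absurd rfl hc | cons a as => rfl
    have hcond : pvCollectA c (line :: rest)
        = if pvIsBreakB line then c else pvCollectA (c ++ [line]) rest := by
      simp only [pvCollectA, pvIsBreakB, hne, Bool.not_false, Bool.true_and]
      rfl
    rw [hcond, List.takeWhile_cons]
    by_cases hb : pvIsBreakB line = true
    · simp [hb]
    · have hb' := Bool.eq_false_iff.mpr hb
      simp only [hb', Bool.false_eq_true, if_false, Bool.not_false, if_true,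
        ih (c ++ [line]) (by simp)]
      simp

lemma findStartA_ge (rest : List String) :
    ∀ k i, pvFindStartA k rest = some i → k ≤ i := by
  induction rest with
  | nil => intro k i h; simp [pvFindStartA] at h
  | cons line rest ih =>
    intro k i h
    simp only [pvFindStartA] at h
    split at h
    · simp only [Option.some.injEq] at h; omega
    · have := ih (k + 1) i h; omega

lemma aSide_eq_ref (lines : List String) :
    ∀ k : Nat,
      (match pvFindStartA k lines with
        | none => none
        | some i => some (pvCollectA [] (lines.drop (i - k)))) = pvRef lines := by
  induction lines with
  | nil => intro k; simp [pvFindStartA, pvRef]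
  | cons line rest ih =>
    intro k
    by_cases hm : PySem.Str.isIn "scoring assessment" (PySem.Str.lower line) = true
    · simp only [pvFindStartA, hm, if_true, pvRef, Nat.sub_self, List.drop_zero]
      have h1 : pvCollectA [] (line :: rest) = pvCollectA [line] rest := by
        simp [pvCollectA]
      rw [h1, collectA_eq_append_takeWhile rest [line] (by simp)]
      simp
    · have hm' := Bool.eq_false_iff.mpr hm
      simp only [pvFindStartA, hm', Bool.false_eq_true, if_false, pvRef]
      rw [← ih (k + 1)]
      cases h : pvFindStartA (k + 1) rest with
      | none => rfl
      | some i =>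
        have hge := findStartA_ge rest (k + 1) i h
        have hdrop : (line :: rest).drop (i - k) = rest.drop (i - (k + 1)) := by
          have h1 : i - k = (i - (k + 1)) + 1 := by omega
          rw [h1, List.drop_succ_cons]
        simp [hdrop]

-- B side vs reference ---------------------------------------------------------

-- every index produced by a filterMap over 'enumerate xs s' is ≥ s
lemma index_ge_of_mem {α : Type} (q : Int × α → Bool) (xs : List α) (s x : Int)
    (h : x ∈ (PySem.List.enumerate xs s).filterMap (fun p => if q p then some p.1 else none)) :
    s ≤ x := by
  rcases List.mem_filterMap.mp h with ⟨p, hp, hx⟩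
  rcases (PySem.List.mem_enumerate_iff _ _ _).mp hp with ⟨k, hk, rfl⟩
  split at hx
  · cases hx; simp
  · cases hx

-- once past the start, the 'start < j' test in B's stops comprehension is always true
lemma stops_filter_simplify (rest : List String) :
    ∀ (s c : Int), c < s →
      (PySem.List.enumerate rest s).filterMap
          (fun p => if c < p.1 && pvIsBreakB p.2 then some p.1 else none)
        = (PySem.List.enumerate rest s).filterMap
          (fun p => if pvIsBreakB p.2 then some p.1 else none) := by
  induction rest with
  | nil => intro s c _; simp [PySem.List.enumerate]
  | cons r rest ih =>
    intro s c hcs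
    rw [PySem.List.enumerate_cons]
    simp only [List.filterMap_cons]
    have hc : (c < s) = True := by simp [hcs]
    simp only [hcs, decide_true, Bool.true_and]
    rw [ih (s + 1) c (by omega)]

-- taking up to the first break index equals takeWhile (no break)
lemma take_stops_eq_takeWhile (rest : List String) :
    ∀ s : Int,
      rest.take ((((PySem.List.enumerate rest s).filterMap
          (fun p => if pvIsBreakB p.2 then some p.1 else none)).headD (s + rest.length) - s).toNat)
        = rest.takeWhile (fun x => !pvIsBreakB x) := by
  induction rest with
  | nil => intro s; simp
  | cons r rest ih
  => intro s
     rw [PySem.List.enumerate_cons]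
     simp only [List.filterMap_cons]
     by_cases hb : pvIsBreakB r = true
     · simp [hb]
     · have hb' := Bool.eq_false_iff.mpr hb
       simp only [hb', Bool.false_eq_true, if_false, List.takeWhile_cons, Bool.not_false, if_true]
       have hge : ∀ x ∈ (PySem.List.enumerate rest (s + 1)).filterMap
           (fun p => if pvIsBreakB p.2 then some p.1 else none), s + 1 ≤ x := by
         intro x hx; exact index_ge_of_mem _ rest (s + 1) x hx
       cases hh : ((PySem.List.enumerate rest (s + 1)).filterMap
           (fun p => if pvIsBreakB p.2 then some p.1 else none)) with
       | nil =>
         simp only [List.headD_nil, List.length_cons]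
         rw [show ((s : Int) + ((rest.length + 1 : Nat) : Int) - s).toNat = rest.length + 1 by
           omega]
         rw [List.take_succ_cons]
         have := ih (s + 1)
         rw [hh] at this
         simp only [List.headD_nil] at this
         rw [show ((s + 1 + (rest.length : Int)) - (s + 1)).toNat = rest.length by omega] at this
         rw [this]
       | cons v tl =>
         simp only [List.headD_cons]
         have hv : s + 1 ≤ v := hge v (by rw [hh]; exact List.mem_cons_self ..)
         have h1 : (v - s).toNat = (v - (s + 1)).toNat + 1 := by omega
         rw [h1, List.take_succ_cons]
         have := ih (s + 1)
         rw [hh] at this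
         simp only [List.headD_cons] at this
         rw [this]

-- the generalised B-side computation equals the reference
lemma bSide_eq_ref (lines : List String) :
    ∀ k : Int,
      (match (PySem.List.enumerate lines k).filterMap
          (fun p => if PySem.Str.isIn "scoring assessment" (PySem.Str.lower p.2) then some p.1 else none) with
        | [] => none
        | start :: _ =>
          some ((lines.drop (start - k).toNat).take
            ((((PySem.List.enumerate lines k).filterMap
                (fun p => if start < p.1 && pvIsBreakB p.2 then some p.1 else none)).headD
                (k + lines.length) - start).toNat)))
        = pvRef lines := by
  induction lines with
  | nil => intro k; simp [PySem.List.enumerate, pvRef]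
  | cons l rest ih =>
    intro k
    rw [PySem.List.enumerate_cons]
    simp only [List.filterMap_cons, pvRef]
    by_cases hm : PySem.Str.isIn "scoring assessment" (PySem.Str.lower l) = true
    · simp only [hm, if_true]
      have hkk : ¬ ((k : Int) < k) := by omega
      simp only [hkk, decide_false, Bool.false_and, Bool.false_eq_true, if_false]
      rw [stops_filter_simplify rest (k + 1) k (by omega)]
      have hsub : ((k : Int) - k).toNat = 0 := by omega
      rw [hsub, List.drop_zero]
      have hge : ∀ x ∈ (PySem.List.enumerate rest (k + 1)).filterMap
          (fun p => if pvIsBreakB p.2 then some p.1 else none), k + 1 ≤ x := by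
        intro x hx; exact index_ge_of_mem _ rest (k + 1) x hx
      cases hh : ((PySem.List.enumerate rest (k + 1)).filterMap
          (fun p => if pvIsBreakB p.2 then some p.1 else none)) with
      | nil =>
        have h1 : ((k + ((l :: rest).length : Int) - k).toNat) = rest.length + 1 := by
          simp
        simp only [List.headD_nil, h1, List.take_succ_cons]
        have := take_stops_eq_takeWhile rest (k + 1)
        rw [hh] at this
        simp only [List.headD] at this
        rw [show ((k + 1 + (rest.length : Int)) - (k + 1)).toNat = rest.length by omega] at this
        rw [this]
      | cons v tl =>
        have hv : k + 1 ≤ v := hge v (by rw [hh]; exact List.mem_cons_self ..)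
        simp only [List.headD_cons]
        rw [show (v - (k : Int)).toNat = (v - (k + 1)).toNat + 1 by omega, List.take_succ_cons]
        have := take_stops_eq_takeWhile rest (k + 1)
        rw [hh] at this
        simp only [List.headD_cons] at this
        rw [this]
    · have hm' := Bool.eq_false_iff.mpr hm
      simp only [hm', Bool.false_eq_true, if_false]
      rw [← ih (k + 1)]
      cases hs : ((PySem.List.enumerate rest (k + 1)).filterMap
          (fun p => if PySem.Str.isIn "scoring assessment" (PySem.Str.lower p.2) then some p.1 else none)) with
      | nil => rfl
      | cons start tl =>
        have hstart : k + 1 ≤ start := index_ge_of_mem _ rest (k + 1) start (by rw [hs]; exact List.mem_cons_self ..)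
        have hkst : ¬ (start < (k : Int)) := by omega
        simp only [hkst, decide_false, Bool.false_and, Bool.false_eq_true, if_false]
        rw [show (start - (k : Int)).toNat = (start - (k + 1)).toNat + 1 by omega, List.drop_succ_cons]
        rw [show ((k : Int) + ((l :: rest).length : Int)) = ((k + 1) + (rest.length : Int)) by simp; ring]

-- ===== VERDICT (by name: the statement is the Claim_ definition above) =====
theorem extract_scoring_section_spec : Claim_equal_extract_scoring_section := by
  intro report_text _
  unfold Spec_extract_scoring_section extract_scoring_section extract_scoring_section_alt
  set lines := PySem.Str.splitlines report_text with hl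
  -- A side
  have hA := aSide_eq_ref lines 0
  have hB := bSide_eq_ref lines 0
  cases hr : pvRef lines with
  | none =>
    rw [hr] at hA hB
    cases hf : pvFindStartA 0 lines with
    | none =>
      simp only [hf]
      cases hs : ((PySem.List.enumerate lines 0).filterMap
          (fun p => if PySem.Str.isIn "scoring assessment" (PySem.Str.lower p.2) then some p.1 else none)) with
      | nil => rfl
      | cons start tl => rw [hs] at hB; simp at hB
    | some i => rw [hf] at hA; simp at hA
  | some cs =>
    rw [hr] at hA hB
    cases hf : pvFindStartA 0 lines with
    | none => rw [hf] at hA; simp at hA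
    | some i =>
      rw [hf] at hA
      simp only [Option.some.injEq] at hA
      cases hs : ((PySem.List.enumerate lines 0).filterMap
          (fun p => if PySem.Str.isIn "scoring assessment" (PySem.Str.lower p.2) then some p.1 else none)) with
      | nil => rw [hs] at hB; simp at hB
      | cons start tl =>
        rw [hs] at hB
        simp only [Option.some.injEq] at hB
        have hstart : (0 : Int) ≤ start := index_ge_of_mem _ lines 0 start (by rw [hs]; exact List.mem_cons_self ..)
        -- A's slice from i, Nat
        have hsliceA : PySem.List.slice lines (some (i : Int)) none = lines.drop i :=
          PySem.List.slice_from_natCast lines i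
        simp only [hf, hs, hsliceA]
        have hcol : pvCollectA [] (lines.drop i) = cs := by
          have : lines.drop i = lines.drop (i - 0) := by simp
          rw [this, hA]
        rw [hcol]
        have hcs : cs ≠ [] := pvRef_ne_nil lines cs hr
        have hcse : cs.isEmpty = false := by cases cs with | nil => exact absurd rfl hcs | cons a as => rfl
        simp only [hcse, Bool.false_eq_true, if_false, Option.some.injEq]
        -- B side: slice start stop
        set stop := ((PySem.List.enumerate lines 0).filterMap
            (fun p => if start < p.1 && pvIsBreakB p.2 then some p.1 else none)).headD (lines.length : Int) with hstopdef
        have hstop0 : (0 : Int) ≤ stop := by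
          cases hq : ((PySem.List.enumerate lines 0).filterMap
              (fun p => if start < p.1 && pvIsBreakB p.2 then some p.1 else none)) with
          | nil => rw [hstopdef, hq]; simp
          | cons v tl2 =>
            have := index_ge_of_mem (fun p => start < p.1 && pvIsBreakB p.2) lines 0 v
              (by rw [hq]; exact List.mem_cons_self ..)
            rw [hstopdef, hq]; simpa using this
        have hslice : PySem.List.slice lines (some start) (some stop)
            = (lines.drop start.toNat).take (stop.toNat - start.toNat) :=
          PySem.List.slice_toNat lines hstart hstop0
        have htoN : stop.toNat - start.toNat = (stop - start).toNat := by omega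
        have hdrop0 : (start - (0 : Int)).toNat = start.toNat := by omega
        rw [hdrop0] at hB
        have hlen0 : ((0 : Int) + (lines.length : Int)) = (lines.length : Int) := by ring
        rw [hlen0] at hB
        rw [hslice, htoN, ← hstopdef] at *
        rw [hB]
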